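-- pv_equiv track=rewrite | github.com/seongjaee/algorithm-study | Codes/CodeTree/Sam의피자학교.py | push_down
-- ===== SOURCE A (Python) =====
-- from copy import deepcopy
--
-- def push_down(matrix):
--     new_matrix = deepcopy(matrix)
--     for i, row in enumerate(matrix):
--         for j, num in enumerate(row):
--             for di, dj in DELTA:
--                 ni, nj = i + di, j + dj
--                 if ni < 0 or nj < 0 or ni >= len(matrix) or nj >= len(matrix[ni]):
--                     continue
--                 d = abs(num - matrix[ni][nj]) // 5
--                 if num > matrix[ni][nj]:
--                     d *= -1
--                 new_matrix[i][j] += d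
--                 new_matrix[ni][nj] -= d
--
--     arr = []
--     for j in range(len(new_matrix[-1])):
--         for i in range(len(new_matrix) - 1, -1, -1):
--             try:
--                 arr.append(new_matrix[i][j])
--             except:
--                 continue
--     return arr
--
-- DELTA = [(0, 1), (1, 0)]
-- ===== SOURCE B (Python) =====
-- def push_down(matrix):
--     n = len(matrix)
--
--     def flow(c, nb):
--         # net amount flowing into a cell of value c from a neighbor of value nb
--         if nb > c:
--             return (nb - c) // 5
--         if nb < c:
--             return -((c - nb) // 5)
--         return 0
--
--     new = []
--     for i, row in enumerate(matrix):
--         new_row = []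
--         for j, c in enumerate(row):
--             v = c
--             for ni, nj in ((i - 1, j), (i + 1, j), (i, j - 1), (i, j + 1)):
--                 if 0 <= ni < n and 0 <= nj < len(matrix[ni]):
--                     v += flow(c, matrix[ni][nj])
--             new_row.append(v)
--         new.append(new_row)
--
--     return [new[i][j]
--             for j in range(len(new[-1]))
--             for i in range(n - 1, -1, -1)
--             if j < len(new[i])]
-- ===== Notes on version B (the rewrite author's own statement) =====
-- stated objective: simpler
-- what changed: A scatters signed flows over right/down edges into a deepcopied grid mutated in place; B builds a fresh grid by a per-cell gather summing the flow from each of the four neighbours read from the original matrix (no copy, no mutation), and emits the readout as one comprehension.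
-- outside the precondition, e.g. on push_down([]): A raises IndexError, B raises IndexError
import Mathlib
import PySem

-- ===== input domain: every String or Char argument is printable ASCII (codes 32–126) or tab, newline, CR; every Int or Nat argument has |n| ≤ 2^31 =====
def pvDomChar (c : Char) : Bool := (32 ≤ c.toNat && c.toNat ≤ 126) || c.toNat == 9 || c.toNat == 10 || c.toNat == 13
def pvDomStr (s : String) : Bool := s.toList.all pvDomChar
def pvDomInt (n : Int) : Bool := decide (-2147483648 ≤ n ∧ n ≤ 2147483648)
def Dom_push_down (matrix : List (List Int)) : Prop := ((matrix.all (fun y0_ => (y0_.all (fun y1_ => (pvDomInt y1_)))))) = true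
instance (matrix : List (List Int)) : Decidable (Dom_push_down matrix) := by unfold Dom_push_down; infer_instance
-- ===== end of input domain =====

-- B replaces A's edge-scatter over a mutated deepcopy by a per-cell gather from the four
-- neighbours into a freshly built grid (objective: simpler — no copy, no in-place updates).


-- shared small helpers: reading a cell / a row length (matrix[i][j], len(matrix[i]))
def pvCell (m : List (List Int)) (i j : Nat) : Int := (m.getD i []).getD j 0
def pvRowLen (m : List (List Int)) (i : Nat) : Int := ((m.getD i []).length : Int)

-- ===== PORT A =====
def pvDelta : List (Int × Int) := [(0, 1), (1, 0)]

-- new_matrix[x][y] += d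
def pvAddAt (m : List (List Int)) (x y : Nat) (d : Int) : List (List Int) :=
  m.modify x (fun row => row.modify y (· + d))

-- the body of A's innermost 'for di, dj in DELTA' loop for one cell (i, j) with value num
def pvScatterStep (matrix nm : List (List Int)) (i j num : Int) : List (List Int) :=
  pvDelta.foldl (fun nm dd =>
    let ni := i + dd.1
    let nj := j + dd.2
    if ni < 0 ∨ nj < 0 ∨ (matrix.length : Int) ≤ ni ∨ pvRowLen matrix ni.toNat ≤ nj then nm
    else
      let nv := pvCell matrix ni.toNat nj.toNat
      let d0 : Int := ((num - nv).natAbs : Int) / 5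
      let d := if num > nv then -d0 else d0
      pvAddAt (pvAddAt nm i.toNat j.toNat d) ni.toNat nj.toNat (-d)) nm

def push_down (matrix : List (List Int)) : List Int :=
  let nm := (PySem.List.enumerate matrix).foldl (fun nm ir =>
      (PySem.List.enumerate ir.2).foldl (fun nm jn => pvScatterStep matrix nm ir.1 jn.1 jn.2) nm) matrix
  let lastRow := (PySem.List.pyGet? nm (-1)).getD []
  (List.range lastRow.length).foldl (fun arr (j : Nat) =>
     (PySem.List.pyRange ((nm.length : Int) - 1) (-1) (-1)).foldl (fun arr i =>
        if (j : Int) < pvRowLen nm i.toNat then arr ++ [pvCell nm i.toNat j] else arr) arr) []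

-- ===== PORT B =====
-- net amount flowing into a cell of value c from a neighbour of value nb
def pvFlow (c nb : Int) : Int :=
  if nb > c then (nb - c) / 5 else if nb < c then -((c - nb) / 5) else 0

def pvOffsets : List (Int × Int) := [(-1, 0), (1, 0), (0, -1), (0, 1)]

def push_down_alt (matrix : List (List Int)) : List Int :=
  let n := matrix.length
  let new := (PySem.List.enumerate matrix).map (fun ir =>
     (PySem.List.enumerate ir.2).map (fun jc =>
        pvOffsets.foldl (fun v od =>
          let ni := ir.1 + od.1
          let nj := jc.1 + od.2
          if 0 ≤ ni ∧ ni < (n : Int) ∧ 0 ≤ nj ∧ nj < pvRowLen matrix ni.toNat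
          then v + pvFlow jc.2 (pvCell matrix ni.toNat nj.toNat) else v) jc.2))
  let lastRow := (PySem.List.pyGet? new (-1)).getD []
  (List.range lastRow.length).flatMap (fun (j : Nat) =>
     ((PySem.List.pyRange ((n : Int) - 1) (-1) (-1)).filter
        (fun i => decide ((j : Int) < pvRowLen new i.toNat))).map (fun i => pvCell new i.toNat j))

-- ===== PRECONDITION & SPEC =====
-- Pre_ excludes only the empty matrix, on which A raises IndexError at new_matrix[-1].
def Pre_push_down (matrix : List (List Int)) : Prop := matrix ≠ []
instance (matrix : List (List Int)) : Decidable (Pre_push_down matrix) := by unfold Pre_push_down; infer_instance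
def pvWitness_push_down : List (List Int) := [[10, 3], [1]]

def Spec_push_down (matrix : List (List Int)) (out : List Int) : Prop := out = push_down_alt matrix
instance (matrix : List (List Int)) (out : List Int) : Decidable (Spec_push_down matrix out) := by unfold Spec_push_down; infer_instance

-- ===== CLAIM (what is proved, stated in full; the proofs are below) =====
def Claim_equal_push_down : Prop := ∀ (matrix : List (List Int)), Dom_push_down matrix → Pre_push_down matrix → Spec_push_down matrix (push_down matrix)

-- ===== LEMMAS AND PROOFS =====

def pvShape (m : List (List Int)) : List Nat := m.map List.length

-- total change pvScatterStep at source cell (a,b) makes at target cell (i,j),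
-- written with every flow read from `matrix`
def pvContrib (matrix : List (List Int)) (a b i j : Nat) : Int :=
    (if a = i ∧ b = j then
       (if ((b : Int) + 1) < pvRowLen matrix a then pvFlow (pvCell matrix a b) (pvCell matrix a (b + 1)) else 0)
     else 0)
  + (if a = i ∧ b + 1 = j then
       (if ((b : Int) + 1) < pvRowLen matrix a then pvFlow (pvCell matrix a (b + 1)) (pvCell matrix a b) else 0)
     else 0)
  + (if a = i ∧ b = j then
       (if ((a : Int) + 1) < (matrix.length : Int) ∧ (b : Int) < pvRowLen matrix (a + 1) then pvFlow (pvCell matrix a b) (pvCell matrix (a + 1) b) else 0)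
     else 0)
  + (if a + 1 = i ∧ b = j then
       (if ((a : Int) + 1) < (matrix.length : Int) ∧ (b : Int) < pvRowLen matrix (a + 1) then pvFlow (pvCell matrix (a + 1) b) (pvCell matrix a b) else 0)
     else 0)

def pvCellList (matrix : List (List Int)) : List (Nat × Nat) :=
  (List.range matrix.length).flatMap (fun a => (List.range (matrix.getD a []).length).map (fun b => (a, b)))

theorem getD_modify_add (row : List Int) (y : Nat) (d : Int) (j : Nat) (hy : y < row.length) :
    (row.modify y (· + d)).getD j 0 = row.getD j 0 + (if y = j then d else 0) := by
  rw [List.getD_eq_getElem?_getD, List.getD_eq_getElem?_getD, List.getElem?_modify]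
  by_cases h : y = j
  · subst h
    have hr : row[y]? = some row[y] := List.getElem?_eq_getElem hy
    simp [hr]
  · simp [h]

theorem pvShape_pvAddAt (m : List (List Int)) (x y : Nat) (d : Int) :
    pvShape (pvAddAt m x y d) = pvShape m := by
  apply List.ext_getElem?
  intro k
  simp only [pvShape, pvAddAt, List.getElem?_map, List.getElem?_modify]
  cases m[k]? with
  | none => simp
  | some row =>
    simp only [Option.map_some]
    split <;> simp

theorem pvLen_of_shape {nm matrix : List (List Int)} (h : pvShape nm = pvShape matrix) :
    nm.length = matrix.length := by
  have := congrArg List.length h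
  simpa [pvShape] using this

theorem pvRowLen_of_shape {nm matrix : List (List Int)} (h : pvShape nm = pvShape matrix) (i : Nat) :
    pvRowLen nm i = pvRowLen matrix i := by
  have h2 : nm[i]?.map List.length = matrix[i]?.map List.length := by
    have := congrArg (fun l => l[i]?) h
    simpa [pvShape] using this
  unfold pvRowLen
  rw [List.getD_eq_getElem?_getD, List.getD_eq_getElem?_getD]
  cases hn : nm[i]? <;> cases hm : matrix[i]? <;> simp [hn, hm] at h2 ⊢
  exact_mod_cast h2

theorem pvCell_pvAddAt (m : List (List Int)) (x y : Nat) (d : Int) (i j : Nat)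
    (hx : x < m.length) (hy : y < (m.getD x []).length) :
    pvCell (pvAddAt m x y d) i j = pvCell m i j + (if x = i ∧ y = j then d else 0) := by
  have hmx : m[x]? = some m[x] := List.getElem?_eq_getElem hx
  have hgd : m.getD x [] = m[x] := by simp [List.getD_eq_getElem?_getD, hmx]
  by_cases hxi : x = i
  · subst hxi
    have key := getD_modify_add m[x] y d j (by rwa [hgd] at hy)
    simp only [pvCell, pvAddAt, List.getD_eq_getElem?_getD (l := m.modify x _),
      List.getElem?_modify, hmx, true_and]
    simpa [← List.getD_eq_getElem?_getD, hgd] using key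
  · simp [pvCell, pvAddAt, List.getD_eq_getElem?_getD, hxi]

theorem pvFlow_eq (c n : Int) :
    (if c > n then -(((c - n).natAbs : Int) / 5) else ((c - n).natAbs : Int) / 5) = pvFlow c n := by
  unfold pvFlow
  rcases lt_trichotomy c n with h | h | h
  · have h1 : ¬ c > n := by omega
    have h2 : ((c - n).natAbs : Int) = n - c := by omega
    simp [h1, h, h2]
  · subst h
    simp
  · have h2 : ((c - n).natAbs : Int) = c - n := by omega
    have h3 : ¬ n > c := by omega
    simp [h, h2, h3]

theorem pvShape_scatterStep (matrix nm : List (List Int)) (i j num : Int) :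
    pvShape (pvScatterStep matrix nm i j num) = pvShape nm := by
  unfold pvScatterStep pvDelta
  simp only [List.foldl]
  split_ifs <;> simp [pvShape_pvAddAt]

theorem pvFlow_antisymm (c n : Int) : pvFlow n c = -pvFlow c n := by
  unfold pvFlow
  rcases lt_trichotomy c n with h | h | h
  · have h1 : ¬ n < c := by omega
    simp [h, h1]
  · subst h; simp
  · have h1 : ¬ c < n := by omega
    simp [h, h1]

theorem pvCell_pvAddAt' (matrix m : List (List Int)) (hsh : pvShape m = pvShape matrix)
    (x y : Nat) (hx : x < matrix.length) (hy : (y : Int) < pvRowLen matrix x) (d : Int) (i j : Nat) :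
    pvCell (pvAddAt m x y d) i j = pvCell m i j + (if x = i ∧ y = j then d else 0)
    ∧ pvShape (pvAddAt m x y d) = pvShape matrix := by
  have hr := pvRowLen_of_shape hsh x
  refine ⟨pvCell_pvAddAt m x y d i j ?_ ?_, by rw [pvShape_pvAddAt]; exact hsh⟩
  · rw [pvLen_of_shape hsh]; exact hx
  · unfold pvRowLen at hr hy; omega

theorem pvCell_scatterStep (matrix nm : List (List Int)) (hsh : pvShape nm = pvShape matrix)
    (a b : Nat) (ha : a < matrix.length) (hb : b < (matrix.getD a []).length) (i j : Nat) :
    pvCell (pvScatterStep matrix nm (a : Int) (b : Int) (pvCell matrix a b)) i j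
      = pvCell nm i j + pvContrib matrix a b i j := by
  have hbI : (b : Int) < pvRowLen matrix a := by unfold pvRowLen; omega
  have haI : (a : Int) < (matrix.length : Int) := by omega
  simp only [pvScatterStep, pvDelta, List.foldl_cons, List.foldl_nil]
  have e0 : ((a : Int) + 0) = (a : Int) := by ring
  have e1 : ((b : Int) + 0) = (b : Int) := by ring
  have e2 : ((b : Int) + 1).toNat = b + 1 := by omega
  have e3 : ((a : Int) + 1).toNat = a + 1 := by omega
  simp only [e0, e1, e2, e3, Int.toNat_natCast]
  rw [pvFlow_eq (pvCell matrix a b) (pvCell matrix a (b + 1))]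
  rw [pvFlow_eq (pvCell matrix a b) (pvCell matrix (a + 1) b)]
  by_cases hD : ((a : Int) + 1) < (matrix.length : Int) ∧ (b : Int) < pvRowLen matrix (a + 1)
  · rw [if_neg (by omega)]
    by_cases hR : ((b : Int) + 1) < pvRowLen matrix a
    · rw [if_neg (by omega)]
      obtain ⟨v1, s1⟩ := pvCell_pvAddAt' matrix nm hsh a b ha (by omega) (pvFlow (pvCell matrix a b) (pvCell matrix a (b + 1))) i j
      obtain ⟨v2, s2⟩ := pvCell_pvAddAt' matrix _ s1 a (b + 1) ha (by omega) (-(pvFlow (pvCell matrix a b) (pvCell matrix a (b + 1)))) i j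
      obtain ⟨v3, s3⟩ := pvCell_pvAddAt' matrix _ s2 a b ha (by omega) (pvFlow (pvCell matrix a b) (pvCell matrix (a + 1) b)) i j
      obtain ⟨v4, _⟩ := pvCell_pvAddAt' matrix _ s3 (a + 1) b (by omega) (by omega) (-(pvFlow (pvCell matrix a b) (pvCell matrix (a + 1) b))) i j
      rw [v4, v3, v2, v1]
      simp only [pvContrib, if_pos hR, if_pos hD,
        pvFlow_antisymm (pvCell matrix a b) (pvCell matrix a (b + 1)),
        pvFlow_antisymm (pvCell matrix a b) (pvCell matrix (a + 1) b)]
      split_ifs <;> ring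
    · rw [if_pos (by omega)]
      obtain ⟨v3, s3⟩ := pvCell_pvAddAt' matrix nm hsh a b ha (by omega) (pvFlow (pvCell matrix a b) (pvCell matrix (a + 1) b)) i j
      obtain ⟨v4, _⟩ := pvCell_pvAddAt' matrix _ s3 (a + 1) b (by omega) (by omega) (-(pvFlow (pvCell matrix a b) (pvCell matrix (a + 1) b))) i j
      rw [v4, v3]
      simp only [pvContrib, if_neg hR, if_pos hD,
        pvFlow_antisymm (pvCell matrix a b) (pvCell matrix (a + 1) b)]
      split_ifs <;> ring
  · rw [if_pos (by omega)]
    by_cases hR : ((b : Int) + 1) < pvRowLen matrix a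
    · rw [if_neg (by omega)]
      obtain ⟨v1, s1⟩ := pvCell_pvAddAt' matrix nm hsh a b ha (by omega) (pvFlow (pvCell matrix a b) (pvCell matrix a (b + 1))) i j
      obtain ⟨v2, _⟩ := pvCell_pvAddAt' matrix _ s1 a (b + 1) ha (by omega) (-(pvFlow (pvCell matrix a b) (pvCell matrix a (b + 1)))) i j
      rw [v2, v1]
      simp only [pvContrib, if_pos hR, if_neg hD,
        pvFlow_antisymm (pvCell matrix a b) (pvCell matrix a (b + 1))]
      split_ifs <;> ring
    · rw [if_pos (by omega)]
      simp only [pvContrib, if_neg hR, if_neg hD]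
      split_ifs <;> ring

theorem pvScatter_fold_cells (matrix : List (List Int)) (cs : List (Nat × Nat))
    (nm : List (List Int)) (hsh : pvShape nm = pvShape matrix)
    (hcs : ∀ p ∈ cs, p.1 < matrix.length ∧ p.2 < (matrix.getD p.1 []).length) (i j : Nat) :
    pvCell (cs.foldl (fun nm p => pvScatterStep matrix nm (p.1 : Int) (p.2 : Int) (pvCell matrix p.1 p.2)) nm) i j
      = pvCell nm i j + (cs.map (fun p => pvContrib matrix p.1 p.2 i j)).sum
    ∧ pvShape (cs.foldl (fun nm p => pvScatterStep matrix nm (p.1 : Int) (p.2 : Int) (pvCell matrix p.1 p.2)) nm) = pvShape matrix := by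
  induction cs generalizing nm with
  | nil => simpa using hsh
  | cons p cs ih =>
    have hp := hcs p (by simp)
    have hsh' : pvShape (pvScatterStep matrix nm (p.1 : Int) (p.2 : Int) (pvCell matrix p.1 p.2)) = pvShape matrix := by
      rw [pvShape_scatterStep]; exact hsh
    obtain ⟨v, s⟩ := ih (pvScatterStep matrix nm (p.1 : Int) (p.2 : Int) (pvCell matrix p.1 p.2)) hsh'
      (fun q hq => hcs q (by simp [hq]))
    refine ⟨?_, by simpa using s⟩
    simp only [List.foldl_cons, List.map_cons, List.sum_cons]
    rw [v, pvCell_scatterStep matrix nm hsh p.1 p.2 hp.1 hp.2 i j]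
    ring

def pvScatterGrid (matrix : List (List Int)) : List (List Int) :=
  (PySem.List.enumerate matrix).foldl (fun nm ir =>
      (PySem.List.enumerate ir.2).foldl (fun nm jn => pvScatterStep matrix nm ir.1 jn.1 jn.2) nm) matrix

def pvGatherGrid (matrix : List (List Int)) : List (List Int) :=
  (PySem.List.enumerate matrix).map (fun ir =>
     (PySem.List.enumerate ir.2).map (fun jc =>
        pvOffsets.foldl (fun v od =>
          let ni := ir.1 + od.1
          let nj := jc.1 + od.2
          if 0 ≤ ni ∧ ni < (matrix.length : Int) ∧ 0 ≤ nj ∧ nj < pvRowLen matrix ni.toNat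
          then v + pvFlow jc.2 (pvCell matrix ni.toNat nj.toNat) else v) jc.2))

theorem pvScatterGrid_eq_fold_cells (matrix : List (List Int)) :
    pvScatterGrid matrix
      = (pvCellList matrix).foldl (fun nm p => pvScatterStep matrix nm (p.1 : Int) (p.2 : Int) (pvCell matrix p.1 p.2)) matrix := by
  unfold pvScatterGrid pvCellList
  rw [List.foldl_flatMap]
  rw [PySem.List.enumerate_eq_map_pyRange matrix [], PySem.List.len_eq,
    PySem.List.pyRange_zero_natCast, List.foldl_map, List.foldl_map]
  refine PySem.List.foldl_congr_mem _ _ _ _ ?_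
  intro nm a hma
  rw [List.foldl_map, PySem.List.pyGetD_natCast]
  rw [PySem.List.enumerate_eq_map_pyRange (matrix.getD a []) 0, PySem.List.len_eq,
    PySem.List.pyRange_zero_natCast, List.foldl_map, List.foldl_map]
  refine PySem.List.foldl_congr_mem _ _ _ _ ?_
  intro nm b hmb
  rw [PySem.List.pyGetD_natCast]
  rfl

theorem ite_add_form (P : Prop) [Decidable P] (v t : Int) :
    (if P then v + t else v) = v + (if P then t else 0) := by
  split_ifs <;> ring

theorem sum_range_zero_int (m : Nat) (F : Nat → Int) (h : ∀ b, b < m → F b = 0) :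
    ((List.range m).map F).sum = 0 := by
  induction m with
  | zero => simp
  | succ m ih =>
    rw [List.range_succ, List.map_append, List.sum_append,
      ih (fun b hb => h b (by omega))]
    simp [h m (by omega)]

theorem sum_range_single_int (m j0 : Nat) (F : Nat → Int) (h : ∀ b, b < m → b ≠ j0 → F b = 0) :
    ((List.range m).map F).sum = if j0 < m then F j0 else 0 := by
  induction m with
  | zero => simp
  | succ m ih =>
    rw [List.range_succ, List.map_append, List.sum_append,
      ih (fun b hb hb2 => h b (by omega) hb2)]
    by_cases hm : j0 = m
    · simp [hm]
    · simp only [List.map_cons, List.map_nil, List.sum_cons, List.sum_nil, add_zero]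
      rw [h m (by omega) (by omega), add_zero]
      split_ifs <;> first | rfl | omega

def pvInner (matrix : List (List Int)) (a i j : Nat) : Int :=
  ((List.range (matrix.getD a []).length).map (fun b => pvContrib matrix a b i j)).sum

set_option maxHeartbeats 1000000 in
theorem pvInner_eq (matrix : List (List Int)) (a i j : Nat)
    (hi : i < matrix.length) (hj : j < (matrix.getD i []).length) :
    pvInner matrix a i j =
      (if a = i then
          (if ((j : Int) + 1) < pvRowLen matrix i then pvFlow (pvCell matrix i j) (pvCell matrix i (j + 1)) else 0)
        + (if 1 ≤ j then pvFlow (pvCell matrix i j) (pvCell matrix i (j - 1)) else 0)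
        + (if ((i : Int) + 1) < (matrix.length : Int) ∧ (j : Int) < pvRowLen matrix (i + 1) then pvFlow (pvCell matrix i j) (pvCell matrix (i + 1) j) else 0)
       else 0)
    + (if a + 1 = i then
        (if j < (matrix.getD a []).length then pvFlow (pvCell matrix i j) (pvCell matrix a j) else 0)
       else 0) := by
  have hjR : (j : Int) < pvRowLen matrix i := by unfold pvRowLen; omega
  have hiL : (i : Int) < (matrix.length : Int) := by omega
  unfold pvInner pvContrib
  rw [PySem.List.sum_map_add_int _ (fun b => _ + _ + _) (fun b => _)]
  rw [PySem.List.sum_map_add_int _ (fun b => _ + _) (fun b => _)]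
  rw [PySem.List.sum_map_add_int _ (fun b => _) (fun b => _)]
  by_cases ha : a = i
  · subst ha
    have hne : ¬ (a + 1 = a) := by omega
    by_cases hj0 : 1 ≤ j
    · have e1 : j - 1 + 1 = j := by omega
      have e2 : ((j - 1 : Nat) : Int) + 1 = (j : Int) := by omega
      have hj1 : j - 1 < (matrix.getD a []).length := by omega
      rw [sum_range_single_int _ j _ (fun b hb hbj => by simp [hbj]),
          sum_range_single_int _ (j - 1) _ (fun b hb hbj => by
            have : ¬ (b + 1 = j) := by omega
            simp [this]),
          sum_range_single_int _ j _ (fun b hb hbj => by simp [hbj]),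
          sum_range_zero_int _ _ (fun b hb => by simp [hne])]
      simp only [e1, e2, if_pos hj, if_pos hj1, if_neg hne, if_pos hj0, eq_self_iff_true, true_and, and_true, and_self, if_true]
      all_goals (try split_ifs) <;> (first | rfl | ring1 | omega | (exfalso; omega))
    · have hj0' : j = 0 := by omega
      rw [sum_range_single_int _ j _ (fun b hb hbj => by simp [hbj]),
          sum_range_zero_int _ _ (fun b hb => by
            have : ¬ (b + 1 = j) := by omega
            simp [this]),
          sum_range_single_int _ j _ (fun b hb hbj => by simp [hbj]),
          sum_range_zero_int _ _ (fun b hb => by simp [hne])]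
      simp only [if_pos hj, if_neg hne, if_neg hj0, eq_self_iff_true, true_and, and_true, and_self, if_true]
      all_goals (try split_ifs) <;> (first | rfl | ring1 | omega | (exfalso; omega))
  · by_cases ha2 : a + 1 = i
    · rw [sum_range_zero_int _ _ (fun b hb => by simp [ha]),
          sum_range_zero_int _ _ (fun b hb => by simp [ha]),
          sum_range_zero_int _ _ (fun b hb => by simp [ha]),
          sum_range_single_int _ j _ (fun b hb hbj => by simp [hbj])]
      simp only [ha2, if_neg ha, if_pos rfl, eq_self_iff_true, true_and, and_true,
        and_self, if_true]
      have hcc : ((a : Int) + 1) < (matrix.length : Int) ∧ (j : Int) < pvRowLen matrix i :=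
        ⟨by omega, hjR⟩
      simp only [if_pos hcc]
      all_goals (try split_ifs) <;> (first | rfl | ring1 | omega | (exfalso; omega))
    · rw [sum_range_zero_int _ _ (fun b hb => by simp [ha]),
          sum_range_zero_int _ _ (fun b hb => by simp [ha]),
          sum_range_zero_int _ _ (fun b hb => by simp [ha]),
          sum_range_zero_int _ _ (fun b hb => by simp [ha2])]
      simp [ha, ha2]

theorem pvCells_sum (matrix : List (List Int)) (i j : Nat)
    (hi : i < matrix.length) (hj : j < (matrix.getD i []).length) :
    ((pvCellList matrix).map (fun p => pvContrib matrix p.1 p.2 i j)).sum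
      = ((List.range matrix.length).map (fun a => pvInner matrix a i j)).sum := by
  unfold pvCellList pvInner
  rw [List.map_flatMap, List.flatMap_def, List.sum_flatten, List.map_map]
  refine congrArg List.sum (List.map_congr_left ?_)
  intro a _
  simp only [Function.comp_apply, List.map_map]
  rfl

theorem pvGather_cell (matrix : List (List Int)) (i j : Nat)
    (hi : i < matrix.length) (hj : j < (matrix.getD i []).length) :
    pvCell (pvGatherGrid matrix) i j
      = pvOffsets.foldl (fun v od =>
          let ni := (i : Int) + od.1
          let nj := (j : Int) + od.2
          if 0 ≤ ni ∧ ni < (matrix.length : Int) ∧ 0 ≤ nj ∧ nj < pvRowLen matrix ni.toNat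
          then v + pvFlow (pvCell matrix i j) (pvCell matrix ni.toNat nj.toNat) else v)
          (pvCell matrix i j) := by
  unfold pvGatherGrid pvCell
  rw [PySem.List.enumerate_eq_map_pyRange matrix [], PySem.List.len_eq,
    PySem.List.pyRange_zero_natCast, List.map_map, List.map_map]
  rw [List.getD_eq_getElem?_getD (l := List.map _ _), List.getElem?_map, List.getElem?_range hi]
  simp only [Option.map_some, Option.getD_some, Function.comp_apply, PySem.List.pyGetD_natCast]
  rw [PySem.List.enumerate_eq_map_pyRange (matrix.getD i []) 0, PySem.List.len_eq,
    PySem.List.pyRange_zero_natCast, List.map_map, List.map_map]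
  rw [List.getD_eq_getElem?_getD, List.getElem?_map, List.getElem?_range hj]
  simp only [Option.map_some, Option.getD_some, Function.comp_apply, PySem.List.pyGetD_natCast]

theorem pvShape_gatherGrid (matrix : List (List Int)) :
    pvShape (pvGatherGrid matrix) = pvShape matrix := by
  unfold pvShape pvGatherGrid
  rw [List.map_map]
  have : (fun ir : Int × List Int => ir.2.length)
      = (List.length ∘ (fun p : Int × List Int => p.2)) := rfl
  calc (PySem.List.enumerate matrix).map _
      = (PySem.List.enumerate matrix).map (fun ir => ir.2.length) := by
        apply List.map_congr_left
        intro p _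
        simp
    _ = ((PySem.List.enumerate matrix).map (fun p => p.2)).map List.length := by
        rw [List.map_map]; rfl
    _ = matrix.map List.length := by rw [PySem.List.map_snd_enumerate]

theorem pvShape_scatterGrid (matrix : List (List Int)) :
    pvShape (pvScatterGrid matrix) = pvShape matrix := by
  rw [pvScatterGrid_eq_fold_cells]
  refine (pvScatter_fold_cells matrix (pvCellList matrix) matrix rfl ?_ 0 0).2
  intro p hp
  unfold pvCellList at hp
  simp only [List.mem_flatMap, List.mem_map, List.mem_range] at hp
  obtain ⟨a, ha, b, hb, rfl⟩ := hp
  exact ⟨ha, by simpa using hb⟩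

set_option maxHeartbeats 1000000 in
theorem pvCell_grids (matrix : List (List Int)) (i j : Nat)
    (hi : i < matrix.length) (hj : j < (matrix.getD i []).length) :
    pvCell (pvScatterGrid matrix) i j = pvCell (pvGatherGrid matrix) i j := by
  rw [pvScatterGrid_eq_fold_cells]
  have hcs : ∀ p ∈ pvCellList matrix, p.1 < matrix.length ∧ p.2 < (matrix.getD p.1 []).length := by
    intro p hp
    unfold pvCellList at hp
    simp only [List.mem_flatMap, List.mem_map, List.mem_range] at hp
    obtain ⟨a, ha, b, hb, rfl⟩ := hp
    exact ⟨ha, by simpa using hb⟩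
  rw [(pvScatter_fold_cells matrix (pvCellList matrix) matrix rfl hcs i j).1]
  rw [pvCells_sum matrix i j hi hj]
  rw [List.map_congr_left (fun a (_ : a ∈ List.range matrix.length) => pvInner_eq matrix a i j hi hj)]
  rw [PySem.List.sum_map_add_int _ (fun a => _) (fun a => _)]
  rw [sum_range_single_int _ i _ (fun a ha hai => by simp [hai])]
  have hjR : (j : Int) < pvRowLen matrix i := by unfold pvRowLen; omega
  have hiL : (i : Int) < (matrix.length : Int) := by omega
  rw [pvGather_cell matrix i j hi hj]
  simp only [pvOffsets, List.foldl_cons, List.foldl_nil, ite_add_form]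
  have e3 : ((i : Int) + 1).toNat = i + 1 := by omega
  have e4 : ((j : Int) + (-1)).toNat = j - 1 := by omega
  have e5 : ((j : Int) + 1).toNat = j + 1 := by omega
  by_cases hi0 : 1 ≤ i
  · rw [sum_range_single_int _ (i - 1) _ (fun a ha hai => by
      have : ¬ (a + 1 = i) := by omega
      simp [this])]
    have e1 : i - 1 + 1 = i := by omega
    have e2 : ((i : Int) + (-1)).toNat = i - 1 := by omega
    have hii : i - 1 < matrix.length := by omega
    have e6 : 1 + j = j + 1 := by omega
    have e7 : 1 + i = i + 1 := by omega
    simp only [e1, e2, e3, e4, e5, Int.toNat_natCast, add_zero, if_pos hi, if_pos hii,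
      eq_self_iff_true, and_self, if_true, true_and, and_true]
    simp only [pvRowLen, e6, e7]
    all_goals (try split_ifs) <;> (first | rfl | ring1 | omega | (exfalso; omega))
  · rw [sum_range_zero_int _ _ (fun a ha => by
      have : ¬ (a + 1 = i) := by omega
      simp [this])]
    have e6 : 1 + j = j + 1 := by omega
    have e7 : 1 + i = i + 1 := by omega
    simp only [e3, e4, e5, Int.toNat_natCast, add_zero, if_pos hi,
      eq_self_iff_true, and_self, if_true, true_and, and_true]
    simp only [pvRowLen, e6, e7]
    all_goals (try split_ifs) <;> (first | rfl | ring1 | omega | (exfalso; omega))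

theorem pvGrids_eq (matrix : List (List Int)) : pvScatterGrid matrix = pvGatherGrid matrix := by
  have hs := pvShape_scatterGrid matrix
  have hg := pvShape_gatherGrid matrix
  apply List.ext_getElem?
  intro k
  have hls : (pvScatterGrid matrix).length = matrix.length := pvLen_of_shape hs
  have hlg : (pvGatherGrid matrix).length = matrix.length := pvLen_of_shape hg
  by_cases hk : k < matrix.length
  · have h1 : (pvScatterGrid matrix)[k]? = some ((pvScatterGrid matrix)[k]'(by omega)) :=
      List.getElem?_eq_getElem (by omega)
    have h2 : (pvGatherGrid matrix)[k]? = some ((pvGatherGrid matrix)[k]'(by omega)) :=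
      List.getElem?_eq_getElem (by omega)
    rw [h1, h2]
    congr 1
    have hrl : ((pvScatterGrid matrix)[k]'(by omega)).length = ((pvGatherGrid matrix)[k]'(by omega)).length := by
      have hs' := pvRowLen_of_shape hs k
      have hg' := pvRowLen_of_shape hg k
      unfold pvRowLen at hs' hg'
      rw [List.getD_eq_getElem?_getD, List.getD_eq_getElem?_getD, h1] at hs'
      rw [List.getD_eq_getElem?_getD, List.getD_eq_getElem?_getD, h2] at hg'
      simp only [Option.getD_some, Nat.cast_inj, ← List.getD_eq_getElem?_getD] at hs' hg'
      omega
    apply List.ext_getElem hrl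
    intro j hj1 hj2
    have hjm : j < (matrix.getD k []).length := by
      have hs' := pvRowLen_of_shape hs k
      unfold pvRowLen at hs'
      rw [List.getD_eq_getElem?_getD (l := pvScatterGrid matrix), h1] at hs'
      simp only [Option.getD_some, Nat.cast_inj, ← List.getD_eq_getElem?_getD] at hs'
      omega
    have hc := pvCell_grids matrix k j hk hjm
    unfold pvCell at hc
    rw [List.getD_eq_getElem?_getD (l := pvScatterGrid matrix), h1,
      List.getD_eq_getElem?_getD (l := pvGatherGrid matrix), h2] at hc
    simp only [Option.getD_some] at hc
    rw [List.getD_eq_getElem?_getD, List.getD_eq_getElem?_getD] at hc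
    rw [List.getElem?_eq_getElem hj1, List.getElem?_eq_getElem hj2] at hc
    simpa using hc
  · rw [List.getElem?_eq_none (by omega), List.getElem?_eq_none (by omega)]

def pvReadA (g : List (List Int)) : List Int :=
  (List.range ((PySem.List.pyGet? g (-1)).getD []).length).foldl (fun arr (j : Nat) =>
     (PySem.List.pyRange ((g.length : Int) - 1) (-1) (-1)).foldl (fun arr (i : Int) =>
        if (j : Int) < pvRowLen g i.toNat then arr ++ [pvCell g i.toNat j] else arr) arr) []

def pvReadB (n : Nat) (g : List (List Int)) : List Int :=
  (List.range ((PySem.List.pyGet? g (-1)).getD []).length).flatMap (fun (j : Nat) =>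
     ((PySem.List.pyRange ((n : Int) - 1) (-1) (-1)).filter
        (fun (i : Int) => decide ((j : Int) < pvRowLen g i.toNat))).map (fun i => pvCell g i.toNat j))

theorem pvRead_eq (g : List (List Int)) (n : Nat) (hn : g.length = n) :
    pvReadA g = pvReadB n g := by
  subst hn
  unfold pvReadA pvReadB
  calc (List.range ((PySem.List.pyGet? g (-1)).getD []).length).foldl (fun arr (j : Nat) =>
         (PySem.List.pyRange ((g.length : Int) - 1) (-1) (-1)).foldl (fun arr (i : Int) =>
            if (j : Int) < pvRowLen g i.toNat then arr ++ [pvCell g i.toNat j] else arr) arr) []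
      = (List.range ((PySem.List.pyGet? g (-1)).getD []).length).foldl (fun arr (j : Nat) =>
          arr ++ ((PySem.List.pyRange ((g.length : Int) - 1) (-1) (-1)).filter
            (fun (i : Int) => decide ((j : Int) < pvRowLen g i.toNat))).map (fun i => pvCell g i.toNat j)) [] := by
        refine PySem.List.foldl_congr_mem _ _ _ _ ?_
        intro arr j _
        exact PySem.List.foldl_append_ite (fun (i : Int) => (j : Int) < pvRowLen g i.toNat)
          (fun (i : Int) => pvCell g i.toNat j) _ arr
    _ = _ := by
        rw [PySem.List.foldl_append_eq_flatMap]
        simp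

-- ===== VERDICT (by name: the statement is the Claim_ definition above) =====
theorem push_down_spec : Claim_equal_push_down := by
  intro matrix _ _
  unfold Spec_push_down
  have hA : push_down matrix = pvReadA (pvScatterGrid matrix) := rfl
  have hB : push_down_alt matrix = pvReadB matrix.length (pvGatherGrid matrix) := rfl
  rw [hA, hB, pvGrids_eq matrix]
  exact pvRead_eq _ _ (pvLen_of_shape (pvShape_gatherGrid matrix))
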